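-- pv_equiv track=rewrite | github.com/ranwez/GeneModelTransfer | SCRIPT/VR/prot_prediction_scoring.py | mask_isolated_sim
-- ===== SOURCE A (Python) =====
-- def mask_isolated_sim(tab, window_size, threshold):
--     new_tab = tab[:]
--     for i in range(len(tab)):
--         if tab[i] != 0:
--             start = max(0, i - window_size)
--             end = min(len(tab), i + window_size + 1)
--             # Sum the values in the window and compare with threshold
--             if sum(tab[start:end]) < threshold:
--                 new_tab[i] = 0
--     return new_tab
-- ===== SOURCE B (Python) =====
-- def mask_isolated_sim(tab, window_size, threshold):
--     n = len(tab)
--     pref = [0]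
--     s = 0
--     for v in tab:
--         s += v
--         pref.append(s)
--     out = []
--     for i, v in enumerate(tab):
--         if v != 0:
--             lo = max(0, i - window_size)
--             hi = min(n, i + window_size + 1)
--             wsum = pref[hi] - pref[lo] if lo < hi else 0
--             out.append(0 if wsum < threshold else v)
--         else:
--             out.append(v)
--     return out
-- ===== Notes on version B (the rewrite author's own statement) =====
-- stated objective: faster
-- what changed: B computes a prefix-sum array in one pass and evaluates each element's window sum as a difference of two prefix sums, instead of re-summing a slice of up to 2*window_size+1 elements for every nonzero entry.
-- outside the precondition, e.g. on mask_isolated_sim([1, 1, 1, 1, 1, 1], -2, 1): A returns [1, 0, 0, 0, 0, 0], B returns [0, 0, 0, 0, 0, 0]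
import Mathlib
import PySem

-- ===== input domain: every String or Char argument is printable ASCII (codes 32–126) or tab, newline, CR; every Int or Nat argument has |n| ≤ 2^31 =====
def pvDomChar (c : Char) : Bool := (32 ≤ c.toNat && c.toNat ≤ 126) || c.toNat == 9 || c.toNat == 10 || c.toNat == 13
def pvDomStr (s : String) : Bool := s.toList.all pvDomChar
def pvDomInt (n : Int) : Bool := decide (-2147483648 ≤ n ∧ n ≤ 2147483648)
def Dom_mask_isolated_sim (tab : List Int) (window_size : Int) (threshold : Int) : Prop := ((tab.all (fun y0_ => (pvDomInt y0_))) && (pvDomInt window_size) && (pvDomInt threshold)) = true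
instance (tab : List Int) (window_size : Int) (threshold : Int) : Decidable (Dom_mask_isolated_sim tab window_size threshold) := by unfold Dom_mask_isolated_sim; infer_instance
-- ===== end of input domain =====

-- B replaces A's per-element window re-summation by a single prefix-sum pass with O(1) window queries (objective: faster, O(n*w) → O(n)).

-- ===== PORT A =====
def mask_isolated_sim (tab : List Int) (window_size : Int) (threshold : Int) : List Int :=
  (PySem.List.pyRange 0 tab.length 1).foldl (fun new_tab i =>
    if PySem.List.pyGetD tab i 0 ≠ 0 then
      let start := max 0 (i - window_size)
      let stop := min (tab.length : Int) (i + window_size + 1)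
      if (PySem.List.slice tab (some start) (some stop)).sum < threshold then
        PySem.List.pySetD new_tab i 0
      else new_tab
    else new_tab) tab

-- ===== PORT B =====
def mask_isolated_sim_alt (tab : List Int) (window_size : Int) (threshold : Int) : List Int :=
  let n : Int := tab.length
  let pref := (tab.foldl (fun (acc : List Int × Int) v => (acc.1 ++ [acc.2 + v], acc.2 + v)) ([0], 0)).1
  (PySem.List.enumerate tab 0).map (fun iv =>
    if iv.2 ≠ 0 then
      let lo := max 0 (iv.1 - window_size)
      let hi := min n (iv.1 + window_size + 1)
      let wsum := if lo < hi then PySem.List.pyGetD pref hi 0 - PySem.List.pyGetD pref lo 0 else 0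
      if wsum < threshold then 0 else iv.2
    else iv.2)

-- ===== PRECONDITION & SPEC =====
-- Pre_ excludes negative window sizes (outside the function's natural domain): there A's slice
-- end can become a negative Python index that wraps around and sums an unrelated tail segment.
def Pre_mask_isolated_sim (_tab : List Int) (window_size : Int) (_threshold : Int) : Prop :=
  0 ≤ window_size
instance (tab : List Int) (window_size : Int) (threshold : Int) : Decidable (Pre_mask_isolated_sim tab window_size threshold) := by unfold Pre_mask_isolated_sim; infer_instance

def pvWitness_mask_isolated_sim : List Int × Int × Int := ([1, 2, 0, 3], 1, 3)

def Spec_mask_isolated_sim (tab : List Int) (window_size : Int) (threshold : Int) (out : List Int) : Prop := out = mask_isolated_sim_alt tab window_size threshold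
instance (tab : List Int) (window_size : Int) (threshold : Int) (out : List Int) : Decidable (Spec_mask_isolated_sim tab window_size threshold out) := by unfold Spec_mask_isolated_sim; infer_instance

-- ===== CLAIM (what is proved, stated in full; the proofs are below) =====
def Claim_equal_mask_isolated_sim : Prop := ∀ (tab : List Int) (window_size : Int) (threshold : Int), Dom_mask_isolated_sim tab window_size threshold → Pre_mask_isolated_sim tab window_size threshold → Spec_mask_isolated_sim tab window_size threshold (mask_isolated_sim tab window_size threshold)

-- ===== LEMMAS AND PROOFS =====

-- the window sum A computes at (nat) index j
def pvWsum (tab : List Int) (ws : Int) (j : Nat) : Int :=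
  (PySem.List.slice tab (some (max 0 ((j : Int) - ws))) (some (min (tab.length : Int) ((j : Int) + ws + 1)))).sum

-- the common pointwise model of both programs
def pvF (tab : List Int) (ws thr : Int) (j : Nat) (v : Int) : Int :=
  if v ≠ 0 ∧ pvWsum tab ws j < thr then 0 else v

-- running prefix sums starting from accumulator s
def pvPrefAux (s : Int) : List Int → List Int
  | [] => []
  | v :: t => (s + v) :: pvPrefAux (s + v) t

theorem pvPrefAux_length (tab : List Int) : ∀ s, (pvPrefAux s tab).length = tab.length := by
  induction tab with
  | nil => intro s; rfl
  | cons v t ih => intro s; simp [pvPrefAux, ih]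

theorem pv_foldl_pref (tab : List Int) : ∀ (p : List Int) (s : Int),
    tab.foldl (fun (acc : List Int × Int) v => (acc.1 ++ [acc.2 + v], acc.2 + v)) (p, s)
      = (p ++ pvPrefAux s tab, s + tab.sum) := by
  induction tab with
  | nil => intro p s; simp [pvPrefAux]
  | cons v t ih => intro p s; simp [pvPrefAux, List.foldl_cons, ih]; ring

theorem pvPrefAux_getD (tab : List Int) : ∀ (s : Int) (k : Nat), k < tab.length →
    (pvPrefAux s tab).getD k 0 = s + (tab.take (k + 1)).sum := by
  induction tab with
  | nil => intro s k h; simp at h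
  | cons v t ih =>
    intro s k h
    cases k with
    | zero => simp [pvPrefAux]
    | succ j =>
      simp only [pvPrefAux, List.getD_cons_succ, List.take_succ_cons, List.sum_cons]
      rw [ih (s + v) j (by simpa using h)]; ring

theorem pvPref_getD (tab : List Int) (k : Nat) (h : k ≤ tab.length) :
    ((0 : Int) :: pvPrefAux 0 tab).getD k 0 = (tab.take k).sum := by
  cases k with
  | zero => simp
  | succ j =>
    simp only [List.getD_cons_succ]
    rw [pvPrefAux_getD tab 0 j (by omega)]; ring

theorem pv_slice_sum (tab : List Int) (a b : Int) (h0 : 0 ≤ a) (hab : a ≤ b) :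
    (PySem.List.slice tab (some a) (some b)).sum
      = (tab.take b.toNat).sum - (tab.take a.toNat).sum := by
  rw [PySem.List.slice_toNat tab h0 (le_trans h0 hab)]
  have h2 : tab.take b.toNat = tab.take a.toNat ++ (tab.drop a.toNat).take (b.toNat - a.toNat) := by
    rw [← List.take_add]
    congr 1
    omega
  rw [h2, List.sum_append]
  ring

theorem pv_enum_map {α β : Type} (tab : List α) : ∀ (s : Int) (g : Int × α → β),
    (PySem.List.enumerate tab s).map g = tab.mapIdx (fun j v => g (s + (j : Int), v)) := by
  induction tab with
  | nil => intro s g; simp [PySem.List.enumerate_nil]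
  | cons v t ih =>
    intro s g
    rw [PySem.List.enumerate_cons, List.map_cons, List.mapIdx_cons, ih]
    have hfun : (fun (j : Nat) (v : α) => g (s + 1 + (j : Int), v))
        = fun (j : Nat) (v : α) => g (s + ((j + 1 : Nat) : Int), v) := by
      funext j v
      congr 2
      push_cast
      ring
    rw [hfun]
    congr 2
    push_cast
    ring

theorem pv_A_eq (tab : List Int) (ws thr : Int) :
    mask_isolated_sim tab ws thr = tab.mapIdx (pvF tab ws thr) := by
  unfold mask_isolated_sim
  have key : ∀ m : Nat, m ≤ tab.length →
      (PySem.List.pyRange 0 (m : Int) 1).foldl (fun new_tab i =>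
        if PySem.List.pyGetD tab i 0 ≠ 0 then
          if (PySem.List.slice tab (some (max 0 (i - ws))) (some (min (tab.length : Int) (i + ws + 1)))).sum < thr then
            PySem.List.pySetD new_tab i 0
          else new_tab
        else new_tab) tab
      = tab.mapIdx (fun j v => if j < m then pvF tab ws thr j v else v) := by
    intro m
    induction m with
    | zero =>
      intro _
      rw [PySem.List.pyRange_one_eq_nil (by omega)]
      simp [List.foldl_nil]
      apply List.ext_getElem <;> simp
    | succ m ih =>
      intro hm
      have hmn : m < tab.length := by omega
      have hcast : ((m + 1 : Nat) : Int) = (m : Int) + 1 := by push_cast; ring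
      rw [hcast, PySem.List.pyRange_one_succ_right (by omega), List.foldl_append]
      rw [ih (by omega)]
      set L := tab.mapIdx (fun j v => if j < m then pvF tab ws thr j v else v) with hL
      have hLlen : L.length = tab.length := by simp [hL]
      have hget : PySem.List.pyGetD tab ((m : Nat) : Int) 0 = tab[m] := by
        simp [PySem.List.pyGetD_natCast, List.getD_eq_getElem?_getD, hmn]
      simp only [List.foldl_cons, List.foldl_nil]
      have hslice : (PySem.List.slice tab (some (max 0 ((m : Int) - ws))) (some (min (tab.length : Int) ((m : Int) + ws + 1)))).sum = pvWsum tab ws m := rfl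
      rw [hget, hslice]
      by_cases h1 : tab[m] ≠ 0
      · rw [if_pos h1]
        by_cases h2 : pvWsum tab ws m < thr
        · rw [if_pos h2, PySem.List.pySetD_natCast]
          apply List.ext_getElem
          · simp [hLlen]
          · intro j hj1 hj2
            rw [List.getElem_set]
            simp only [hL, List.getElem_mapIdx]
            have hjn : j < tab.length := by simpa [hLlen] using hj1
            by_cases hjm : j = m
            · subst hjm
              simp [pvF, h1, h2]
            · have : ¬ (m = j) := fun h => hjm h.symm
              simp only [this, if_false]
              by_cases hlt : j < m
              · simp only [if_pos hlt, if_pos (show j < m + 1 by omega)]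
              · simp only [if_neg hlt, if_neg (show ¬ j < m + 1 by omega)]
        · rw [if_neg h2]
          apply List.ext_getElem
          · simp [hLlen]
          · intro j hj1 hj2
            simp only [hL, List.getElem_mapIdx]
            by_cases hjm : j = m
            · subst hjm
              simp [pvF, h2, (by omega : j < j + 1)]
            · by_cases hlt : j < m
              · simp only [if_pos hlt, if_pos (show j < m + 1 by omega)]
              · simp only [if_neg hlt, if_neg (show ¬ j < m + 1 by omega)]
      · rw [if_neg h1]
        apply List.ext_getElem
        · simp [hLlen]
        · intro j hj1 hj2
          simp only [hL, List.getElem_mapIdx]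
          simp only [ne_eq, not_not] at h1
          by_cases hjm : j = m
          · subst hjm
            simp [pvF, h1, (by omega : j < j + 1)]
          · by_cases hlt : j < m
            · simp only [if_pos hlt, if_pos (show j < m + 1 by omega)]
            · simp only [if_neg hlt, if_neg (show ¬ j < m + 1 by omega)]
  rw [key tab.length (le_refl _)]
  apply List.ext_getElem
  · simp
  · intro j hj1 hj2
    simp only [List.getElem_mapIdx]
    simp [(by simpa using hj2 : j < tab.length)]

theorem pv_B_eq (tab : List Int) (ws thr : Int) (hws : 0 ≤ ws) :
    mask_isolated_sim_alt tab ws thr = tab.mapIdx (pvF tab ws thr) := by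
  unfold mask_isolated_sim_alt
  simp only []
  rw [pv_foldl_pref tab [0] 0]
  simp only [List.singleton_append]
  rw [pv_enum_map]
  apply List.mapIdx_eq_mapIdx_iff.mpr
  intro j hj
  set v := tab[j] with hv
  simp only [zero_add]
  by_cases h1 : v ≠ 0
  · rw [if_pos h1]
    unfold pvF
    set lo : Int := max 0 ((j : Int) - ws) with hlo
    set hi : Int := min (tab.length : Int) ((j : Int) + ws + 1) with hhi
    have hjn : (j : Int) < tab.length := by exact_mod_cast hj
    have hlo0 : 0 ≤ lo := by rw [hlo]; omega
    have hloj : lo ≤ (j : Int) := by rw [hlo]; omega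
    have hhij : (j : Int) < hi := by rw [hhi]; omega
    have hhin : hi ≤ (tab.length : Int) := by rw [hhi]; omega
    have hlohi : lo < hi := lt_of_le_of_lt hloj hhij
    simp only [hlohi, if_true]
    have hplen : ((0 : Int) :: pvPrefAux 0 tab).length = tab.length + 1 := by
      simp [pvPrefAux_length]
    have ghi : PySem.List.pyGetD ((0 : Int) :: pvPrefAux 0 tab) hi 0 = (tab.take hi.toNat).sum := by
      rw [PySem.List.pyGetD_eq_getElem _ _ (by omega) (by rw [hplen]; push_cast; omega)]
      rw [← pvPref_getD tab hi.toNat (by omega)]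
      rw [List.getD_eq_getElem _ _ (by rw [hplen]; omega)]
    have glo : PySem.List.pyGetD ((0 : Int) :: pvPrefAux 0 tab) lo 0 = (tab.take lo.toNat).sum := by
      rw [PySem.List.pyGetD_eq_getElem _ _ hlo0 (by rw [hplen]; push_cast; omega)]
      rw [← pvPref_getD tab lo.toNat (by omega)]
      rw [List.getD_eq_getElem _ _ (by rw [hplen]; omega)]
    rw [ghi, glo]
    have : pvWsum tab ws j = (tab.take hi.toNat).sum - (tab.take lo.toNat).sum := by
      unfold pvWsum
      rw [← hlo, ← hhi]
      exact pv_slice_sum tab lo hi hlo0 (le_of_lt hlohi)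
    rw [← this]
    simp [h1]
  · simp only [ne_eq, not_not] at h1
    simp [h1, pvF]

-- ===== VERDICT (by name: the statement is the Claim_ definition above) =====
theorem mask_isolated_sim_spec : Claim_equal_mask_isolated_sim := by
  intro tab ws thr _ hpre
  unfold Spec_mask_isolated_sim
  rw [pv_A_eq, pv_B_eq tab ws thr hpre]
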